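-- pv_equiv track=rewrite | github.com/slaclab/mps_database | mps_database/database/make_logic_from_template.py | figure_out_destinations
-- ===== SOURCE A (Python) =====
-- def figure_out_destinations(destinations,bc):
--   ret = []
--   for count in range(0,6):
--     ret.append('null')
--   for dest in destinations:
--     if dest == 'LASER':
--       ret[0] = bc
--     if dest == 'DIAG0':
--       ret[1] = bc
--     if dest == 'DUMPBSY':
--       ret[2] = bc
--     if dest == 'DUMPHXR':
--       ret[3] = bc
--     if dest == 'DUMPSXR':
--       ret[4] = bc
--     if dest == 'LESA':
--       ret[5] = bc
--   return ret
-- ===== SOURCE B (Python) =====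
-- def figure_out_destinations(destinations, bc):
--   present = set(destinations)
--   names = ['LASER', 'DIAG0', 'DUMPBSY', 'DUMPHXR', 'DUMPSXR', 'LESA']
--   return [bc if name in present else 'null' for name in names]
-- ===== Notes on version B (the rewrite author's own statement) =====
-- stated objective: idiomatic
-- what changed: Instead of pre-filling a 6-slot list and scanning the destinations with six positional assignments, B builds a membership set once and maps the fixed ordered name list to bc-or-'null' with a comprehension.
import Mathlib
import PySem

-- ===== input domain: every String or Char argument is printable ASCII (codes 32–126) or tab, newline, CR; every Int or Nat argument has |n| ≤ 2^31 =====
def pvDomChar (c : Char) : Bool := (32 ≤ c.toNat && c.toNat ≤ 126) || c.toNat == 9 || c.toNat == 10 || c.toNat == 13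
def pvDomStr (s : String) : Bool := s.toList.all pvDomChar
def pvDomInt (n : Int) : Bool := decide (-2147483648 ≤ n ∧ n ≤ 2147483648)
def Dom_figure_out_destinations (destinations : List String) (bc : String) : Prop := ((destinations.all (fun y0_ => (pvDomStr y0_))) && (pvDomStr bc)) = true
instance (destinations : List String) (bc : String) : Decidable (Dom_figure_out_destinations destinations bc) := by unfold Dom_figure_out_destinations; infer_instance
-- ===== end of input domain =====

-- B replaces A's pre-filled 6-slot list with positional assignments by a membership set and a
-- comprehension over the fixed ordered name list (idiomatic; same O(n) cost).

-- ===== PORT A =====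
-- the body of A's 'for dest in destinations' loop: six independent ifs assigning into ret.
-- ret always has length 6 and each index is the literal 0..5, always in range, so Python's
-- 'ret[i] = bc' is exactly List.set (no IndexError possible).
def pvStepA (bc : String) (ret : List String) (dest : String) : List String :=
  let ret := if dest == "LASER" then ret.set 0 bc else ret
  let ret := if dest == "DIAG0" then ret.set 1 bc else ret
  let ret := if dest == "DUMPBSY" then ret.set 2 bc else ret
  let ret := if dest == "DUMPHXR" then ret.set 3 bc else ret
  let ret := if dest == "DUMPSXR" then ret.set 4 bc else ret
  let ret := if dest == "LESA" then ret.set 5 bc else ret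
  ret

def figure_out_destinations (destinations : List String) (bc : String) : List String :=
  let ret := (PySem.List.pyRange 0 6 1).foldl (fun r _ => r ++ ["null"]) []
  destinations.foldl (pvStepA bc) ret

-- ===== PORT B =====
def figure_out_destinations_alt (destinations : List String) (bc : String) : List String :=
  let present := PySem.Set.ofList destinations
  (["LASER", "DIAG0", "DUMPBSY", "DUMPHXR", "DUMPSXR", "LESA"]).map
    (fun name => if name ∈ present then bc else "null")

-- ===== PRECONDITION & SPEC =====
def Spec_figure_out_destinations (destinations : List String) (bc : String) (out : List String) : Prop := out = figure_out_destinations_alt destinations bc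
instance (destinations : List String) (bc : String) (out : List String) : Decidable (Spec_figure_out_destinations destinations bc out) := by unfold Spec_figure_out_destinations; infer_instance

-- ===== CLAIM (what is proved, stated in full; the proofs are below) =====
def Claim_equal_figure_out_destinations : Prop := ∀ (destinations : List String) (bc : String), Dom_figure_out_destinations destinations bc → Spec_figure_out_destinations destinations bc (figure_out_destinations destinations bc)

-- ===== LEMMAS AND PROOFS =====

set_option maxHeartbeats 1000000 in
lemma pvStepA_eval (bc a b c d e f x : String) :
    pvStepA bc [a, b, c, d, e, f] x =
      [if x = "LASER" then bc else a, if x = "DIAG0" then bc else b,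
       if x = "DUMPBSY" then bc else c, if x = "DUMPHXR" then bc else d,
       if x = "DUMPSXR" then bc else e, if x = "LESA" then bc else f] := by
  simp only [pvStepA]
  split_ifs <;> simp_all

lemma pv_if_mem_cons (n x bc a : String) (t : List String) :
    (if n ∈ t then bc else (if x = n then bc else a)) = (if n ∈ x :: t then bc else a) := by
  by_cases h1 : n ∈ t <;> by_cases h2 : x = n <;> simp_all [List.mem_cons, eq_comm]

lemma pv_loopA (bc : String) (ds : List String) (a b c d e f : String) :
    ds.foldl (pvStepA bc) [a, b, c, d, e, f] =
      [if "LASER" ∈ ds then bc else a, if "DIAG0" ∈ ds then bc else b,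
       if "DUMPBSY" ∈ ds then bc else c, if "DUMPHXR" ∈ ds then bc else d,
       if "DUMPSXR" ∈ ds then bc else e, if "LESA" ∈ ds then bc else f] := by
  induction ds generalizing a b c d e f with
  | nil => simp
  | cons x t ih =>
    rw [List.foldl_cons, pvStepA_eval, ih]
    simp only [pv_if_mem_cons]

-- ===== VERDICT (by name: the statement is the Claim_ definition above) =====
theorem figure_out_destinations_spec : Claim_equal_figure_out_destinations := by
  intro ds bc _
  unfold Spec_figure_out_destinations figure_out_destinations figure_out_destinations_alt
  show ds.foldl (pvStepA bc) ["null", "null", "null", "null", "null", "null"] = _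
  rw [pv_loopA]
  simp [PySem.Set.mem_ofList]
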